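-- pv_equiv track=rewrite | github.com/elecdot/bjut-ca-simplescalar | bin/analyze.py | replace_dl1
-- ===== SOURCE A (Python) =====
-- def replace_dl1(tokens, new_dl1_cfg):
--     """
--     在 token 列表中替换 dl1 配置（紧随 "-cache:dl1" 的下一个 token）。
--     若不存在，则在最前插入 "-cache:dl1", <cfg>。
--     """
--     out = []
--     replaced = False
--     i = 0
--     n = len(tokens)
--     while i < n:
--         tok = tokens[i]
--         if tok == "-cache:dl1" and not replaced:
--             out.append(tok)
--             if i + 1 < n:
--                 out.append(new_dl1_cfg)
--                 i += 2
--             else: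
--                 out.append(new_dl1_cfg)
--                 i += 1
--             replaced = True
--         else:
--             out.append(tok)
--             i += 1
--     if not replaced:
--         out = ["-cache:dl1", new_dl1_cfg] + out
--     return out
-- ===== SOURCE B (Python) =====
-- def replace_dl1(tokens, new_dl1_cfg):
--     if "-cache:dl1" not in tokens:
--         return ["-cache:dl1", new_dl1_cfg] + list(tokens)
--     idx = tokens.index("-cache:dl1")
--     return list(tokens[:idx + 1]) + [new_dl1_cfg] + list(tokens[idx + 2:])
-- ===== Notes on version B (the rewrite author's own statement) =====
-- stated objective: simpler
-- what changed: Replaces A's flag-driven while loop with an index-and-switch accumulator by a locate-then-splice: find the first "-cache:dl1" and rebuild the list from two slices around the replaced config token.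
import Mathlib
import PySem

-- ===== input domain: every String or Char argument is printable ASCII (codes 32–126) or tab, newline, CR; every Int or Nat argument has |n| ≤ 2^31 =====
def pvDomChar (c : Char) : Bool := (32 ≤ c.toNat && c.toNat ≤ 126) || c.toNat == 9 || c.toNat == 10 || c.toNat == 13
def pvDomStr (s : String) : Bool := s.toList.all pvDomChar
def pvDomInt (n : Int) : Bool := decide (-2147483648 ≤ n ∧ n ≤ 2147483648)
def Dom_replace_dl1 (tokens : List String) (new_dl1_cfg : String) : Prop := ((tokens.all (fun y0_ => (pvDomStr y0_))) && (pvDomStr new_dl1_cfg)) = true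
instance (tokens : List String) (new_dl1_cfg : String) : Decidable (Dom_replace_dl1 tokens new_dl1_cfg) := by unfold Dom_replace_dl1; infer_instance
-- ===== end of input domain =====

-- B replaces A's flag-driven while loop with a locate-then-splice around the first "-cache:dl1" (simpler decomposition, same cost).


-- ===== PORT A =====
-- A's while loop over indices, transcribed as recursion over the token list
-- (the current suffix is tokens[i:]; 'i + 1 < n' becomes 'rest nonempty'), threading the 'replaced' flag.
def replaceDl1Loop : List String → Bool → String → List String × Bool
  | [], replaced, _ => ([], replaced)
  | t :: rest, replaced, cfg =>
    if t = "-cache:dl1" ∧ replaced = false then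
      match rest with
      | [] => ([t, cfg], true)                                   -- i + 1 = n: append cfg, i += 1
      | _ :: rest' =>                                            -- i + 1 < n: append cfg, i += 2 (skip old cfg)
        let p := replaceDl1Loop rest' true cfg
        (t :: cfg :: p.1, p.2)
    else
      let p := replaceDl1Loop rest replaced cfg
      (t :: p.1, p.2)

def replace_dl1 (tokens : List String) (new_dl1_cfg : String) : List String :=
  let p := replaceDl1Loop tokens false new_dl1_cfg
  if p.2 = false then "-cache:dl1" :: new_dl1_cfg :: p.1 else p.1

-- ===== PORT B =====
def replace_dl1_alt (tokens : List String) (new_dl1_cfg : String) : List String :=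
  if tokens.contains "-cache:dl1" = false then
    "-cache:dl1" :: new_dl1_cfg :: tokens
  else
    match PySem.List.index? tokens "-cache:dl1" with
    | none => "-cache:dl1" :: new_dl1_cfg :: tokens              -- unreachable: the flag is present
    | some idx => tokens.take (idx + 1) ++ [new_dl1_cfg] ++ tokens.drop (idx + 2)

-- ===== PRECONDITION & SPEC =====
def Spec_replace_dl1 (tokens : List String) (new_dl1_cfg : String) (out : List String) : Prop := out = replace_dl1_alt tokens new_dl1_cfg
instance (tokens : List String) (new_dl1_cfg : String) (out : List String) : Decidable (Spec_replace_dl1 tokens new_dl1_cfg out) := by unfold Spec_replace_dl1; infer_instance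

-- ===== CLAIM (what is proved, stated in full; the proofs are below) =====
def Claim_equal_replace_dl1 : Prop := ∀ (tokens : List String) (new_dl1_cfg : String), Dom_replace_dl1 tokens new_dl1_cfg → Spec_replace_dl1 tokens new_dl1_cfg (replace_dl1 tokens new_dl1_cfg)

-- ===== LEMMAS AND PROOFS =====

-- with replaced = true the loop copies the suffix unchanged
theorem replaceDl1Loop_true (ts : List String) (cfg : String) :
    replaceDl1Loop ts true cfg = (ts, true) := by
  induction ts with
  | nil => rfl
  | cons t rest ih =>
    have hne : ¬(t = "-cache:dl1" ∧ true = false) := fun hc => by simpa using hc.2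
    cases rest with
    | nil => rw [replaceDl1Loop.eq_2, if_neg hne]; rfl
    | cons x rest' =>
      rw [replaceDl1Loop.eq_3, if_neg hne]
      simp only [ih]

-- with no flag present the loop copies the list and leaves the flag false
theorem replaceDl1Loop_not_mem (ts : List String) (cfg : String)
    (h : "-cache:dl1" ∉ ts) :
    replaceDl1Loop ts false cfg = (ts, false) := by
  induction ts with
  | nil => rfl
  | cons t rest ih =>
    simp only [List.mem_cons, not_or] at h
    have hne : ¬(t = "-cache:dl1" ∧ false = false) := fun hc => h.1 hc.1.symm
    cases rest with
    | nil => rw [replaceDl1Loop.eq_2, if_neg hne]; rfl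
    | cons x rest' =>
      rw [replaceDl1Loop.eq_3, if_neg hne]
      simp only [ih h.2]

-- with the flag first found at index k, the loop produces exactly B's splice
theorem replaceDl1Loop_mem (ts : List String) (cfg : String) (k : Nat)
    (h : PySem.List.index? ts "-cache:dl1" = some k) :
    replaceDl1Loop ts false cfg = (ts.take (k + 1) ++ [cfg] ++ ts.drop (k + 2), true) := by
  induction ts generalizing k with
  | nil => simp [PySem.List.index?_eq_idxOf?, List.idxOf?] at h
  | cons t rest ih =>
    by_cases ht : t = "-cache:dl1"
    · subst ht
      rw [PySem.List.index?_cons_self] at h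
      cases h
      cases rest with
      | nil => rw [replaceDl1Loop.eq_2, if_pos ⟨rfl, rfl⟩]; rfl
      | cons x rest' =>
        rw [replaceDl1Loop.eq_3, if_pos ⟨rfl, rfl⟩]
        simp [replaceDl1Loop_true]
    · rw [PySem.List.index?_cons_of_ne rest ht] at h
      cases hk : PySem.List.index? rest "-cache:dl1" with
      | none => rw [hk] at h; simp at h
      | some k' =>
        rw [hk] at h
        simp only [Option.map_some] at h
        cases h
        have hne : ¬(t = "-cache:dl1" ∧ false = false) := fun hc => ht hc.1
        cases rest with
        | nil => simp [PySem.List.index?_eq_idxOf?, List.idxOf?] at hk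
        | cons x rest' =>
          rw [replaceDl1Loop.eq_3, if_neg hne]
          simp only [ih k' hk, List.take_succ_cons, List.drop_succ_cons,
            List.cons_append]

-- ===== VERDICT (by name: the statement is the Claim_ definition above) =====
theorem replace_dl1_spec : Claim_equal_replace_dl1 := by
  intro tokens cfg _
  unfold Spec_replace_dl1 replace_dl1 replace_dl1_alt
  by_cases hmem : "-cache:dl1" ∈ tokens
  · have hsome : (PySem.List.index? tokens "-cache:dl1").isSome := by
      rw [PySem.List.index?_isSome_iff]; exact hmem
    cases hk : PySem.List.index? tokens "-cache:dl1" with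
    | none => rw [hk] at hsome; simp at hsome
    | some k =>
      simp [replaceDl1Loop_mem tokens cfg k hk, hmem]
  · simp [replaceDl1Loop_not_mem tokens cfg hmem, hmem]
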